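-- pv_equiv track=rewrite | github.com/andrewmmeans/little-foot | src/process_data.py | build_details
-- ===== SOURCE A (Python) =====
-- def build_details(str_lst):
--     """
--     Parameters
--     ----------
--     str_list: list(str)
--         A list of strings
--
--     Returns
--     -------
--     result : dict
--         A dictionary with key, value pairs from processing the details section
--     """
--     # empty list to store return key value pairs
--     result = {}
--
--     valid_columns = ['YEAR', 'SEASON', 'MONTH', 'STATE', 'COUNTY', 'LOCATION DETAILS',
--        'NEAREST TOWN', 'NEAREST ROAD', 'OBSERVED', 'ALSO NOTICED',
--        'OTHER WITNESSES', 'OTHER STORIES', 'TIME AND CONDITIONS',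
--        'ENVIRONMENT', 'DATE', 'extra']
--
--     # flag to alter the way we build keys
--     process_diff = False
--
--     # empty array to store extra information if process_diff flag is True
--     extra = []
--     for i, x in enumerate(str_lst):
--         # splits each line into a key, value string pair
--         first, *second = x.split(':')
--
--         if not first.isupper() and first not in valid_columns:
--             # checks if key isn't CAPS, if not we process the rest of the html differently
--             process_diff = True
--
--         if not process_diff:
--             # we join the second part in case there exists a colon ":" inside the raw text
--             result[first] = (' '.join(second)).strip()
--
--         else:
--             # append each extra line to a general array
--             extra.append(x)
--
--     # combine all extra values into a single long string
--     result['extra'] = ' '.join(extra)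
--     remove_keys = []
--     # find all keys that don't match schema
--     for key in result.keys():
--         if key not in valid_columns:
--             remove_keys.append(key)
--     # remove keys from result
--     for key in remove_keys:
--         result.pop(key)
--     return result
-- ===== SOURCE B (Python) =====
-- VALID_COLUMNS = ['YEAR', 'SEASON', 'MONTH', 'STATE', 'COUNTY', 'LOCATION DETAILS',
--                  'NEAREST TOWN', 'NEAREST ROAD', 'OBSERVED', 'ALSO NOTICED',
--                  'OTHER WITNESSES', 'OTHER STORIES', 'TIME AND CONDITIONS',
--                  'ENVIRONMENT', 'DATE', 'extra']
--
--
-- def build_details(str_lst):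
--     # boundary: first line whose key (text before the first ':') is neither
--     # all-uppercase nor a schema column; everything from there on is 'extra'.
--     boundary = 0
--     while boundary < len(str_lst):
--         k = str_lst[boundary].split(':')[0]
--         if not (k.isupper() or k in VALID_COLUMNS):
--             break
--         boundary += 1
--     result = {}
--     for line in str_lst[:boundary]:
--         first, *rest = line.split(':')
--         if first in VALID_COLUMNS:
--             result[first] = ' '.join(rest).strip()
--     result['extra'] = ' '.join(str_lst[boundary:])
--     return result
-- ===== Notes on version B (the rewrite author's own statement) =====
-- stated objective: simpler
-- what changed: A's single flag-driven scan with an insert-everything dict plus two post-passes (collect invalid keys, pop them) is replaced by: compute the boundary index first, build the dict from the head lines with the schema filter applied inline, and join the tail lines into 'extra'; no flag, no removal passes.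
import Mathlib
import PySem

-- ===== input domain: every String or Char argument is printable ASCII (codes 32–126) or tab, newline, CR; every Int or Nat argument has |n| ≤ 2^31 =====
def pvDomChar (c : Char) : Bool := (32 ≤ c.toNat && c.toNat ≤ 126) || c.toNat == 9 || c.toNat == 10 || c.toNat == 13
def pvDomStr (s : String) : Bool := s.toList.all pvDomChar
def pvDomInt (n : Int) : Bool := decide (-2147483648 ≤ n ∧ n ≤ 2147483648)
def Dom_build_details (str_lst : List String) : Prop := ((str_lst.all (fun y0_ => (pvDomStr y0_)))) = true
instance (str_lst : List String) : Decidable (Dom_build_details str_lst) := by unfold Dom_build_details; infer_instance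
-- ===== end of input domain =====

-- B replaces A's flag-driven scan + post-hoc key-removal passes by: find the boundary index first,
-- then build the dict from the head lines with the schema filter applied inline, then join the tail
-- into 'extra' (same result; objective: simpler decomposition, same cost).


-- ===== PORT A =====
def validColumns : List String :=
  ["YEAR", "SEASON", "MONTH", "STATE", "COUNTY", "LOCATION DETAILS",
   "NEAREST TOWN", "NEAREST ROAD", "OBSERVED", "ALSO NOTICED",
   "OTHER WITNESSES", "OTHER STORIES", "TIME AND CONDITIONS",
   "ENVIRONMENT", "DATE", "extra"]

-- x.split(':'): the separator is the nonempty literal ":", so split? is always `some`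
def splitColon (x : String) : List String := (PySem.Str.split? x ":").getD []

-- s.isupper(): hand-ported; exact on the ASCII domain, where the cased characters are exactly the letters
def strIsupper (s : String) : Bool :=
  s.toList.any (fun c => PySem.Chars.isupper c || PySem.Chars.islower c) &&
  s.toList.all (fun c => !PySem.Chars.islower c)

-- one iteration of A's for-loop; state = (result, process_diff, extra)
def buildStep (st : PySem.Dict String String × Bool × List String) (x : String) :
    PySem.Dict String String × Bool × List String :=
  let parts := splitColon x
  let first := parts.headD ""   -- first, *second = x.split(':') (split always yields ≥ 1 piece)
  let second := parts.tail
  let pd := if !(strIsupper first) && !(validColumns.contains first) then true else st.2.1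
  if !pd then
    (st.1.insert first (PySem.Str.strip (PySem.Str.join " " second)), pd, st.2.2)
  else
    (st.1, pd, st.2.2 ++ [x])

def build_details (str_lst : List String) : List (String × String) :=
  -- for i, x in enumerate(str_lst): i is never used, x = pair.1 of zipIdx
  let st := (str_lst.zipIdx).foldl (fun st ix => buildStep st ix.1) (PySem.Dict.empty, false, [])
  let result := (st.1).insert "extra" (PySem.Str.join " " st.2.2)
  let removeKeys := result.keys.foldl
    (fun acc k => if !(validColumns.contains k) then acc ++ [k] else acc) []
  -- result.pop(key): every key in removeKeys is a key of result, so pop never raises; erase = pop's effect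
  let result := removeKeys.foldl (fun d k => d.erase k) result
  result.items

-- ===== PORT B =====
def lineKey (x : String) : String := (splitColon x).headD ""

def okLine (x : String) : Bool := strIsupper (lineKey x) || validColumns.contains (lineKey x)

-- the while-loop of Source B: number of leading lines whose key is all-caps or a schema column
def boundary : List String → Nat
  | [] => 0
  | x :: xs => if okLine x then boundary xs + 1 else 0

def build_details_alt (str_lst : List String) : List (String × String) :=
  let b := boundary str_lst
  let head := str_lst.take b    -- str_lst[:b], 0 ≤ b ≤ len: exact
  let tail := str_lst.drop b    -- str_lst[b:]
  let d := head.foldl (fun d x =>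
      let parts := splitColon x
      let first := parts.headD ""
      if validColumns.contains first then
        d.insert first (PySem.Str.strip (PySem.Str.join " " parts.tail))
      else d)
    PySem.Dict.empty
  (d.insert "extra" (PySem.Str.join " " tail)).items

-- ===== PRECONDITION & SPEC =====
def Spec_build_details (str_lst : List String) (out : List (String × String)) : Prop := out = build_details_alt str_lst
instance (str_lst : List String) (out : List (String × String)) : Decidable (Spec_build_details str_lst out) := by unfold Spec_build_details; infer_instance

-- ===== CLAIM (what is proved, stated in full; the proofs are below) =====
def Claim_equal_build_details : Prop := ∀ (str_lst : List String), Dom_build_details str_lst → Spec_build_details str_lst (build_details str_lst)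

-- ===== LEMMAS AND PROOFS =====

-- short names for the proof
def lineVal (x : String) : String := PySem.Str.strip (PySem.Str.join " " (splitColon x).tail)

def insA (h : List String) (d : PySem.Dict String String) : PySem.Dict String String :=
  h.foldl (fun d x => d.insert (lineKey x) (lineVal x)) d

def insB (h : List String) (d : PySem.Dict String String) : PySem.Dict String String :=
  h.foldl (fun d x => if validColumns.contains (lineKey x) then d.insert (lineKey x) (lineVal x) else d) d

def filterD (d : PySem.Dict String String) : PySem.Dict String String :=
  PySem.Dict.mk (d.items.filter (fun p => validColumns.contains p.1))

-- the enumerate index is never used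
theorem foldl_zipIdx_step (l : List String) (n : Nat) (st : PySem.Dict String String × Bool × List String) :
    (l.zipIdx n).foldl (fun st ix => buildStep st ix.1) st = l.foldl buildStep st := by
  induction l generalizing n st with
  | nil => rfl
  | cons x xs ih => simp [List.zipIdx_cons, List.foldl_cons, ih]

-- a step on an ok line inserts and keeps the flag false
theorem buildStep_ok (x : String) (d : PySem.Dict String String) (e : List String)
    (hok : okLine x = true) :
    buildStep (d, false, e) x = (d.insert (lineKey x) (lineVal x), false, e) := by
  simp only [okLine, lineKey] at hok
  simp only [buildStep, lineKey, lineVal]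
  cases h1 : strIsupper ((splitColon x).headD "") <;>
    cases h2 : validColumns.contains ((splitColon x).headD "") <;> simp_all

-- a step on a not-ok line sets the flag and appends to extra (whatever the flag was)
theorem buildStep_bad (x : String) (d : PySem.Dict String String) (b : Bool) (e : List String)
    (hok : okLine x = false) :
    buildStep (d, b, e) x = (d, true, e ++ [x]) := by
  simp only [okLine, lineKey] at hok
  simp only [buildStep]
  cases h1 : strIsupper ((splitColon x).headD "") <;>
    cases h2 : validColumns.contains ((splitColon x).headD "") <;> simp_all

-- once process_diff is true, the loop only appends raw lines to extra
theorem foldl_buildStep_true (l : List String) (d : PySem.Dict String String) (e : List String) :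
    l.foldl buildStep (d, true, e) = (d, true, e ++ l) := by
  induction l generalizing e with
  | nil => simp
  | cons x xs ih =>
      have hstep : buildStep (d, true, e) x = (d, true, e ++ [x]) := by
        simp [buildStep]
      simp [List.foldl_cons, hstep, ih]

-- the loop from a false flag: head lines are inserted, tail lines go to extra
theorem foldl_buildStep_false (l : List String) (d : PySem.Dict String String) (e : List String) :
    l.foldl buildStep (d, false, e) =
      (insA (l.take (boundary l)) d, boundary l != l.length, e ++ l.drop (boundary l)) := by
  induction l generalizing d e with
  | nil => simp [boundary, insA]
  | cons x xs ih =>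
      by_cases hok : okLine x = true
      · rw [List.foldl_cons, buildStep_ok x d e hok, ih]
        have hbne : ((boundary xs + 1) != (xs.length + 1)) = (boundary xs != xs.length) := by simp
        simp [boundary, hok, insA, hbne]
      · have hok' : okLine x = false := by simpa using hok
        rw [List.foldl_cons, buildStep_bad x d false e hok', foldl_buildStep_true]
        simp [boundary, hok', insA]

-- erasing a list of keys filters the items by those keys
theorem foldl_erase_eq_filter (ks : List String) (d : PySem.Dict String String) :
    ks.foldl (fun d k => d.erase k) d =
      PySem.Dict.mk (d.items.filter (fun p => decide (p.1 ∉ ks))) := by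
  induction ks generalizing d with
  | nil => apply PySem.Dict.ext; simp
  | cons k ks ih =>
      rw [List.foldl_cons, ih]
      apply PySem.Dict.ext
      simp only [PySem.Dict.erase, List.filter_filter]
      apply List.filter_congr
      intro p _
      by_cases h : p.1 = k <;> simp [h]

-- filter commutes with one insert
theorem filterD_insert (d : PySem.Dict String String) (k v : String) :
    filterD (d.insert k v) =
      if validColumns.contains k then (filterD d).insert k v else filterD d := by
  have hrepl : ∀ (l : List (String × String)),
      (l.map (fun p => if p.1 == k then (k, v) else p)).filter (fun p => validColumns.contains p.1)
        = (l.filter (fun p => validColumns.contains p.1)).map (fun p => if p.1 == k then (k, v) else p) := by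
    intro l
    rw [List.filter_map]
    apply congrArg
    apply List.filter_congr
    intro p _
    by_cases h : p.1 = k <;> simp [h]
  by_cases hc : (d.items.any fun p => p.1 == k) = true
  · by_cases hv : validColumns.contains k = true
    · have hcF : ((d.items.filter (fun p => validColumns.contains p.1)).any fun p => p.1 == k) = true := by
        rcases List.any_eq_true.1 hc with ⟨p, hp, hpk⟩
        have hpk' : p.1 = k := by simpa using hpk
        refine List.any_eq_true.2 ⟨p, List.mem_filter.2 ⟨hp, by rw [hpk']; exact hv⟩, hpk⟩
      apply PySem.Dict.ext
      simp only [filterD, PySem.Dict.insert, PySem.Dict.contains, hc, hcF, hv, if_true]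
      exact hrepl d.items
    · have hv' : validColumns.contains k = false := by simpa using hv
      apply PySem.Dict.ext
      simp only [filterD, PySem.Dict.insert, PySem.Dict.contains, hc, hv', if_true,
        Bool.false_eq_true, if_false]
      rw [hrepl d.items]
      have hfix : ∀ p ∈ d.items.filter (fun p => validColumns.contains p.1),
          (if p.1 == k then (k, v) else p) = p := by
        intro p hp
        have hpv := (List.mem_filter.1 hp).2
        have hne : (p.1 == k) = false := by
          refine beq_eq_false_iff_ne.2 ?_
          intro hEq
          rw [hEq] at hpv
          rw [hv'] at hpv
          exact Bool.false_ne_true hpv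
        simp [hne]
      exact (List.map_congr_left hfix).trans (List.map_id _)
  · have hc' : (d.items.any fun p => p.1 == k) = false := Bool.eq_false_iff.mpr hc
    have hcF : ((d.items.filter (fun p => validColumns.contains p.1)).any fun p => p.1 == k) = false := by
      refine List.any_eq_false.2 ?_
      intro p hp
      exact List.any_eq_false.1 hc' p (List.mem_filter.1 hp).1
    by_cases hv : validColumns.contains k = true
    · apply PySem.Dict.ext
      simp only [filterD, PySem.Dict.insert, PySem.Dict.contains, hc', hcF, hv, if_true,
        Bool.false_eq_true, if_false, List.filter_append]
      have hvm : k ∈ validColumns := by simpa using hv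
      simp [hvm]
    · have hv' : validColumns.contains k = false := by simpa using hv
      apply PySem.Dict.ext
      simp only [filterD, PySem.Dict.insert, PySem.Dict.contains, hc', hv',
        Bool.false_eq_true, if_false, List.filter_append]
      have hvm' : k ∉ validColumns := by simpa using hv'
      simp [hvm']

-- filter commutes with the whole head loop
theorem filterD_insA (h : List String) (d : PySem.Dict String String) :
    filterD (insA h d) = insB h (filterD d) := by
  induction h generalizing d with
  | nil => rfl
  | cons x xs ih =>
      simp only [insA, insB, List.foldl_cons] at *
      rw [ih, filterD_insert]

-- ===== VERDICT (by name: the statement is the Claim_ definition above) =====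
theorem build_details_spec : Claim_equal_build_details := by
  intro str_lst _
  unfold Spec_build_details build_details build_details_alt
  rw [foldl_zipIdx_step, foldl_buildStep_false]
  simp only [List.nil_append]
  set hd := str_lst.take (boundary str_lst) with hhd
  set tl := str_lst.drop (boundary str_lst) with htl
  set J := PySem.Str.join " " tl with hJ
  set dA := (insA hd PySem.Dict.empty).insert "extra" J with hdA
  -- remove_keys is the list of invalid keys of dA
  have hrk : dA.keys.foldl (fun acc k => if !(validColumns.contains k) then acc ++ [k] else acc) []
      = dA.keys.filter (fun k => !(validColumns.contains k)) := by
    have := PySem.List.foldl_append_if (fun k => !(validColumns.contains k)) (id) dA.keys []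
    simpa using this
  rw [hrk, foldl_erase_eq_filter]
  -- erasing exactly the invalid keys = keeping the valid items
  have hfilt : dA.items.filter
        (fun p => decide (p.1 ∉ dA.keys.filter (fun k => !(validColumns.contains k))))
      = dA.items.filter (fun p => validColumns.contains p.1) := by
    apply List.filter_congr
    intro p hp
    have hpk : p.1 ∈ dA.keys := by
      simp only [PySem.Dict.keys]
      exact List.mem_map.2 ⟨p, hp, rfl⟩
    by_cases hv : validColumns.contains p.1 = true
    · have hnot : p.1 ∉ dA.keys.filter (fun k => !(validColumns.contains k)) := by
        intro hmem
        have h2 := (List.mem_filter.1 hmem).2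
        rw [hv] at h2
        exact Bool.false_ne_true (by simpa using h2)
      simp only [decide_eq_true hnot, hv]
    · have hv' : validColumns.contains p.1 = false := by simpa using hv
      have hmem : p.1 ∈ dA.keys.filter (fun k => !(validColumns.contains k)) :=
        List.mem_filter.2 ⟨hpk, by simpa using hv'⟩
      simp only [decide_eq_false (not_not_intro hmem), hv']
  rw [hfilt]
  -- now the left side is filterD dA; commute the filter inside
  have hleft : PySem.Dict.mk (dA.items.filter (fun p => validColumns.contains p.1)) = filterD dA := rfl
  rw [hleft, hdA, filterD_insert, filterD_insA]
  have hex : validColumns.contains "extra" = true := by decide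
  have hempty : filterD PySem.Dict.empty = PySem.Dict.empty := rfl
  rw [if_pos hex, hempty]
  -- B's fold is insB up to unfolding lineKey/lineVal
  have hB : insB hd PySem.Dict.empty
      = hd.foldl (fun d x =>
          let parts := splitColon x
          let first := parts.headD ""
          if validColumns.contains first then
            d.insert first (PySem.Str.strip (PySem.Str.join " " parts.tail))
          else d) PySem.Dict.empty := by
    simp only [insB, lineKey, lineVal]
  rw [hB]
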